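-- pv_equiv track=rewrite | github.com/queelius/computational-explorations | src/approx_algorithms.py | _find_all_k_cliques
-- ===== SOURCE A (Python) =====
-- from typing import (
--     Any,
--     Callable,
--     Dict,
--     FrozenSet,
--     List,
--     Optional,
--     Set,
--     Tuple,
-- )
--
-- def _find_all_k_cliques(
--     adj: Dict[int, Set[int]],
--     n: int,
--     k: int,
-- ) -> List[Tuple[int, ...]]:
--     """Find ALL k-cliques (complete subgraphs) in the graph."""
--     cliques: List[Tuple[int, ...]] = []
--     vertices = sorted(adj.keys())
--
--     def extend(current: List[int], candidates: List[int]) -> None: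
--         if len(current) == k:
--             cliques.append(tuple(current))
--             return
--         needed = k - len(current)
--         for idx, v in enumerate(candidates):
--             if len(candidates) - idx < needed:
--                 break
--             if all(v in adj.get(u, set()) for u in current):
--                 new_cands = [w for w in candidates[idx + 1:] if w in adj.get(v, set())]
--                 extend(current + [v], new_cands)
--
--     extend([], vertices)
--     return cliques
-- ===== SOURCE B (Python) =====
-- def _is_clique(combo, adj):
--     """True iff every earlier vertex of combo lists every later one as a neighbour."""
--     if not combo:
--         return True
--     u, rest = combo[0], combo[1:]
--     return all(v in adj.get(u, set()) for v in rest) and _is_clique(rest, adj)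
--
--
-- def _combinations(items, r):
--     """All r-element subsequences of items, in lexicographic (itertools) order."""
--     if r == 0:
--         return [()]
--     if len(items) < r:
--         return []
--     first, rest = items[0], items[1:]
--     return [(first,) + c for c in _combinations(rest, r - 1)] + _combinations(rest, r)
--
--
-- def _find_all_k_cliques(adj, n, k):
--     """Flat generate-and-test: every size-k vertex subset, kept iff it is a clique."""
--     if k < 0:
--         return []
--     vertices = sorted(adj.keys())
--     return [c for c in _combinations(vertices, k) if _is_clique(c, adj)]
-- ===== Notes on version B (the rewrite author's own statement) =====
-- stated objective: alternative
-- what changed: A's pruned recursive backtracking expansion (nested closure mutating an accumulator, candidate-set filtering and a remaining-length break) is replaced by flat generate-and-test: enumerate all size-k vertex combinations in lexicographic order and keep those whose every ordered pair passes the adjacency test.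
import Mathlib
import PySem

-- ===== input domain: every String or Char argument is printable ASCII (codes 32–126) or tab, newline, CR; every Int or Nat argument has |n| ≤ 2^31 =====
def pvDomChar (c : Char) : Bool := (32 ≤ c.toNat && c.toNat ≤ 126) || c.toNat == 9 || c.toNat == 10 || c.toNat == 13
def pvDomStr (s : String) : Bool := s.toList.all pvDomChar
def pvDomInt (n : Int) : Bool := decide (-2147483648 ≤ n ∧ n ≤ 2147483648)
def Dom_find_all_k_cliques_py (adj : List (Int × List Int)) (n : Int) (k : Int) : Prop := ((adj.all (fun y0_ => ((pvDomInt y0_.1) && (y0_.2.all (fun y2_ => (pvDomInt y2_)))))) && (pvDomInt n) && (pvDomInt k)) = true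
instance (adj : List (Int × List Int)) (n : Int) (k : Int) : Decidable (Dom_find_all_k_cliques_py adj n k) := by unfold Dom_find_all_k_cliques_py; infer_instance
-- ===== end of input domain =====

-- B replaces A's pruned recursive clique expansion by a flat generate-and-test over all
-- size-k vertex combinations (same emission order); alternative decomposition, no speed claim.

-- ===== PORT A =====
-- The nested `extend` closure becomes two mutually recursive functions (extend / its for-loop).
-- In the loop, `len(candidates) - idx` always equals the length of the not-yet-visited suffix
-- (idx elements have been consumed), so the break test is stated on that suffix.
mutual
def pvExtendA (adj : PySem.Dict Int (List Int)) (k : Int) (current candidates : List Int) : List (List Int) :=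
  if (current.length : Int) = k then [current]
  else pvLoopA adj k current candidates
termination_by (candidates.length, 1)

def pvLoopA (adj : PySem.Dict Int (List Int)) (k : Int) (current : List Int) : List Int → List (List Int)
  | [] => []
  | v :: rest =>
    if ((rest.length : Int) + 1) < k - (current.length : Int) then []
    else
      (if current.all (fun u => (adj.getD u []).contains v) then
        pvExtendA adj k (current ++ [v]) (rest.filter (fun w => (adj.getD v []).contains w))
      else []) ++ pvLoopA adj k current rest
termination_by candidates => (candidates.length, 0)
decreasing_by
  · exact Prod.Lex.left _ _ (by simpa using Nat.lt_succ_of_le (List.length_filter_le _ _))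
  · exact Prod.Lex.left _ _ (by simp)
end

def find_all_k_cliques_py (adj : List (Int × List Int)) (n : Int) (k : Int) : List (List Int) :=
  let d := PySem.Dict.ofList adj
  let vertices := PySem.List.sorted d.keys (fun x => x) false
  pvExtendA d k [] vertices

-- ===== PORT B =====
def pvIsClique (adj : PySem.Dict Int (List Int)) : List Int → Bool
  | [] => true
  | u :: rest => rest.all (fun v => (adj.getD u []).contains v) && pvIsClique adj rest

-- B's _combinations; the `[], r ≠ 0` branch stands for Python's (unreachable: the length
-- guard catches it on every r ≥ 0 call B makes) items[0] on an empty list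
def pvCombos : List Int → Int → List (List Int)
  | [], r => if r = 0 then [[]] else []
  | x :: rest, r =>
    if r = 0 then [[]]
    else if (((x :: rest).length : Int)) < r then []
    else (pvCombos rest (r - 1)).map (fun c => x :: c) ++ pvCombos rest r

def find_all_k_cliques_py_alt (adj : List (Int × List Int)) (n : Int) (k : Int) : List (List Int) :=
  if k < 0 then []
  else
    let d := PySem.Dict.ofList adj
    let vertices := PySem.List.sorted d.keys (fun x => x) false
    (pvCombos vertices k).filter (fun c => pvIsClique d c)

-- ===== PRECONDITION & SPEC =====
def Spec_find_all_k_cliques_py (adj : List (Int × List Int)) (n : Int) (k : Int) (out : List (List Int)) : Prop := out = find_all_k_cliques_py_alt adj n k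
instance (adj : List (Int × List Int)) (n : Int) (k : Int) (out : List (List Int)) : Decidable (Spec_find_all_k_cliques_py adj n k out) := by unfold Spec_find_all_k_cliques_py; infer_instance

-- ===== CLAIM (what is proved, stated in full; the proofs are below) =====
def Claim_equal_find_all_k_cliques_py : Prop := ∀ (adj : List (Int × List Int)) (n : Int) (k : Int), Dom_find_all_k_cliques_py adj n k → Spec_find_all_k_cliques_py adj n k (find_all_k_cliques_py adj n k)

-- ===== LEMMAS AND PROOFS =====

-- proof-side clean combinations function (no length shortcut)
def pvChooseL : List Int → Int → List (List Int)
  | [], r => if r = 0 then [[]] else []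
  | x :: rest, r =>
    if r = 0 then [[]]
    else (pvChooseL rest (r - 1)).map (fun c => x :: c) ++ pvChooseL rest r

theorem pvChooseL_zero (l : List Int) : pvChooseL l 0 = [[]] := by
  cases l <;> simp [pvChooseL]

theorem pvChooseL_short : ∀ (items : List Int) (r : Int), (items.length : Int) < r → pvChooseL items r = [] := by
  intro items
  induction items with
  | nil =>
    intro r h
    have hr : r ≠ 0 := by simp at h; omega
    simp [pvChooseL, hr]
  | cons x rest ih =>
    intro r h
    have hr : r ≠ 0 := by simp at h; omega
    have h1 : ((rest.length : Int)) < r - 1 := by simp at h; omega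
    have h2 : ((rest.length : Int)) < r := by simp at h; omega
    simp [pvChooseL, hr, ih _ h1, ih _ h2]

theorem pvCombos_eq_chooseL : ∀ (items : List Int) (r : Int), 0 ≤ r → pvCombos items r = pvChooseL items r := by
  intro items
  induction items with
  | nil => intro r _; rfl
  | cons x rest ih =>
    intro r hr0
    by_cases hr : r = 0
    · simp [pvCombos, pvChooseL, hr]
    · rw [pvCombos, pvChooseL, if_neg hr, if_neg hr]
      by_cases hs : (((x :: rest).length : Int)) < r
      · rw [if_pos hs]
        have h1 : ((rest.length : Int)) < r - 1 := by simp at hs; omega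
        have h2 : ((rest.length : Int)) < r := by simp at hs; omega
        simp [pvChooseL_short _ _ h1, pvChooseL_short _ _ h2]
      · rw [if_neg hs, ih _ (by omega), ih _ hr0]

theorem pvIsClique_append (d : PySem.Dict Int (List Int)) :
    ∀ (xs ys : List Int), pvIsClique d (xs ++ ys) =
      (pvIsClique d xs && xs.all (fun u => ys.all (fun w => (d.getD u []).contains w)) && pvIsClique d ys) := by
  intro xs ys
  induction xs with
  | nil => simp [pvIsClique]
  | cons u xs ih =>
    simp only [List.cons_append, pvIsClique, List.all_append, List.all_cons, ih]
    cases pvIsClique d xs <;> cases pvIsClique d ys <;>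
      cases xs.all (fun v => (d.getD u []).contains v) <;>
      cases ys.all (fun w => (d.getD u []).contains w) <;>
      cases xs.all (fun u => ys.all (fun w => (d.getD u []).contains w)) <;> simp

-- combinations drawn from a filtered pool, re-filtered by a predicate that anyway rejects
-- every combination containing a removed element, equal combinations from the full pool
theorem pvChooseL_filter (p : Int → Bool) :
    ∀ (items : List Int) (r : Int) (P : List Int → Bool),
      (∀ c, (∃ w ∈ c, p w = false) → P c = false) →
      (pvChooseL (items.filter p) r).filter P = (pvChooseL items r).filter P := by
  intro items
  induction items with
  | nil => intro r P _; simp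
  | cons x rest ih =>
    intro r P hP
    by_cases hr : r = 0
    · subst hr; rw [pvChooseL_zero, pvChooseL_zero]
    · by_cases hx : p x
      · have hfc : (x :: rest).filter p = x :: rest.filter p := by simp [hx]
        rw [hfc, pvChooseL, pvChooseL, if_neg hr, if_neg hr,
            List.filter_append, List.filter_append, List.filter_map, List.filter_map,
            ih (r - 1) (P ∘ fun c => x :: c) (by
              intro c hc
              rcases hc with ⟨w, hw, hpw⟩
              exact hP _ ⟨w, List.mem_cons_of_mem _ hw, hpw⟩),
            ih r P hP]
      · have hx' : p x = false := by simpa using hx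
        have hfc : (x :: rest).filter p = rest.filter p := by simp [hx']
        rw [hfc, ih r P hP]
        conv_rhs => rw [pvChooseL]
        rw [if_neg hr, List.filter_append]
        have hmap : ((pvChooseL rest (r - 1)).map (fun c => x :: c)).filter P = [] := by
          rw [List.filter_eq_nil_iff]
          intro c hc
          rcases List.mem_map.mp hc with ⟨c', _, rfl⟩
          simp [hP (x :: c') ⟨x, List.mem_cons_self, hx'⟩]
        simp [hmap]

-- for negative k the extension loop (and hence A) yields nothing
theorem pvLoopA_neg (d : PySem.Dict Int (List Int)) (k : Int) (hk : k < 0) :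
    ∀ (n : Nat) (candidates : List Int), candidates.length ≤ n →
      ∀ current, pvLoopA d k current candidates = [] := by
  intro n
  induction n with
  | zero =>
    intro candidates hle current
    have : candidates = [] := List.eq_nil_of_length_eq_zero (Nat.le_zero.mp hle)
    subst this; rw [pvLoopA.eq_1]
  | succ n ih =>
    intro candidates hle current
    match candidates with
    | [] => rw [pvLoopA.eq_1]
    | v :: rest =>
      have hrest : rest.length ≤ n := by
        have := hle; simp at this; omega
      have hnb : ¬ (((rest.length : Int) + 1) < k - (current.length : Int)) := by
        have h1 : (0:Int) ≤ (rest.length : Int) := Int.natCast_nonneg _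
        have h2 : (0:Int) ≤ (current.length : Int) := Int.natCast_nonneg _
        omega
      have hne : ¬ ((((current ++ [v]).length : Int)) = k) := by
        have : (0:Int) ≤ ((current ++ [v]).length : Int) := Int.natCast_nonneg _
        omega
      have hfl : (rest.filter (fun w => (d.getD v []).contains w)).length ≤ n :=
        Nat.le_trans (rest.length_filter_le _) hrest
      rw [pvLoopA.eq_2, if_neg hnb, pvExtendA, if_neg hne, ih _ hfl, ih _ hrest]
      simp

-- main invariant: the pruned loop equals "all extensions by a combination of the candidates,
-- filtered by cliqueness"
theorem pvLoopA_eq (d : PySem.Dict Int (List Int)) (k : Int) :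
    ∀ (n : Nat) (candidates : List Int), candidates.length ≤ n →
      ∀ current, (current.length : Int) < k → pvIsClique d current = true →
        pvLoopA d k current candidates =
          ((pvChooseL candidates (k - current.length)).filter
              (fun c => pvIsClique d (current ++ c))).map (fun c => current ++ c) := by
  intro n
  induction n with
  | zero =>
    intro candidates hle current hlt _
    have : candidates = [] := List.eq_nil_of_length_eq_zero (Nat.le_zero.mp hle)
    subst this
    have hne : k - (current.length : Int) ≠ 0 := by omega
    rw [pvLoopA.eq_1, pvChooseL, if_neg hne]
    simp
  | succ n ih =>
    intro candidates hle current hlt hcl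
    match candidates with
    | [] =>
      have hne : k - (current.length : Int) ≠ 0 := by omega
      rw [pvLoopA.eq_1, pvChooseL, if_neg hne]
      simp
    | v :: rest =>
      have hrest : rest.length ≤ n := by
        have := hle; simp at this; omega
      have hrne : k - (current.length : Int) ≠ 0 := by omega
      rw [pvLoopA.eq_2]
      by_cases hbr : ((rest.length : Int) + 1) < k - (current.length : Int)
      · -- break: too few candidates remain; RHS is empty too, by the length shortcut
        have h1 : ((rest.length : Int)) < k - (current.length : Int) - 1 := by omega
        have h2 : ((rest.length : Int)) < k - (current.length : Int) := by omega
        rw [if_pos hbr, pvChooseL, if_neg hrne,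
            pvChooseL_short _ _ h1, pvChooseL_short _ _ h2]
        simp
      · rw [if_neg hbr]
        conv_rhs => rw [pvChooseL]
        rw [if_neg hrne, List.filter_append, List.map_append, List.filter_map, List.map_map]
        simp only [Function.comp_def]
        rw [ih rest hrest current hlt hcl]
        congr 1
        -- first summand: the iteration that selects v
        by_cases hchk : current.all (fun u => (d.getD u []).contains v)
        · rw [if_pos hchk]
          have hclv : pvIsClique d (current ++ [v]) = true := by
            rw [pvIsClique_append]
            simp [hcl, pvIsClique]
            simpa using hchk
          have hlenv : (((current ++ [v]).length : Int)) = (current.length : Int) + 1 := by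
            simp
          have hfilP : ∀ c, (∃ w ∈ c, ((d.getD v []).contains w) = false) →
              (pvIsClique d ((current ++ [v]) ++ c)) = false := by
            intro c ⟨w, hw, hcw⟩
            cases h : pvIsClique d ((current ++ [v]) ++ c) with
            | false => rfl
            | true =>
              rw [pvIsClique_append] at h
              simp only [Bool.and_eq_true] at h
              have h2 := (List.all_eq_true.mp h.1.2) v (by simp)
              have h3 := (List.all_eq_true.mp h2) w hw
              rw [hcw] at h3; exact absurd h3 (by simp)
          by_cases hfin : (((current ++ [v]).length : Int)) = k
          · -- the extension completes a k-clique
            rw [pvExtendA, if_pos hfin]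
            have h0 : k - (current.length : Int) - 1 = 0 := by
              rw [hlenv] at hfin; omega
            have hce : (fun c => pvIsClique d (current ++ v :: c)) [] = true := by
              simpa using hclv
            rw [h0, pvChooseL_zero]
            simp [hclv]
          · rw [pvExtendA, if_neg hfin]
            have hlt' : (((current ++ [v]).length : Int)) < k := by
              rw [hlenv] at hfin ⊢; omega
            rw [ih _ (Nat.le_trans (rest.length_filter_le _) hrest) _ hlt' hclv]
            rw [pvChooseL_filter _ _ _ _ hfilP]
            have hk' : k - (((current ++ [v]).length : Int)) = k - (current.length : Int) - 1 := by
              rw [hlenv]; omega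
            rw [hk']
            have hfun : (fun c => current ++ [v] ++ c) = (fun (c : List Int) => current ++ v :: c) :=
              funext (fun c => by simp)
            have hpred : (fun c => pvIsClique d (current ++ [v] ++ c)) =
                (fun (c : List Int) => pvIsClique d (current ++ v :: c)) :=
              funext (fun c => by simp)
            rw [hfun, hpred]
        · -- v fails the adjacency test: every combination starting with v is filtered out
          rw [if_neg hchk]
          have hfalse : ∀ c, pvIsClique d (current ++ v :: c) = false := by
            intro c
            have hchk' : current.all (fun u => (d.getD u []).contains v) = false := by
              cases h : current.all (fun u => (d.getD u []).contains v)
              · rfl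
              · exact absurd h hchk
            rcases List.all_eq_false.mp hchk' with ⟨u, hu, hcu⟩
            cases h : pvIsClique d (current ++ v :: c) with
            | false => rfl
            | true =>
              rw [pvIsClique_append] at h
              simp only [Bool.and_eq_true] at h
              have h2 := (List.all_eq_true.mp h.1.2) u hu
              exact absurd ((List.all_eq_true.mp h2) v (by simp)) hcu
          have hnil : (pvChooseL rest (k - (current.length : Int) - 1)).filter
              (fun c => pvIsClique d (current ++ v :: c)) = [] := by
            rw [List.filter_eq_nil_iff]
            intro c _
            simp [hfalse c]
          simp [hnil]

theorem pvExtendA_eq (d : PySem.Dict Int (List Int)) (k : Int)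
    (candidates current : List Int) (h1 : (current.length : Int) ≤ k)
    (h2 : pvIsClique d current = true) :
    pvExtendA d k current candidates =
      ((pvChooseL candidates (k - current.length)).filter
          (fun c => pvIsClique d (current ++ c))).map (fun c => current ++ c) := by
  by_cases hk : (current.length : Int) = k
  · rw [pvExtendA, if_pos hk]
    have h0 : k - (current.length : Int) = 0 := by omega
    rw [h0, pvChooseL_zero]
    simp [h2]
  · rw [pvExtendA, if_neg hk]
    exact pvLoopA_eq d k candidates.length candidates (Nat.le_refl _) current (by omega) h2

-- ===== VERDICT (by name: the statement is the Claim_ definition above) =====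
theorem find_all_k_cliques_py_spec : Claim_equal_find_all_k_cliques_py := by
  intro adj n k _
  unfold Spec_find_all_k_cliques_py find_all_k_cliques_py find_all_k_cliques_py_alt
  by_cases hk : k < 0
  · rw [if_pos hk]
    rw [pvExtendA, if_neg (by simp; omega)]
    exact pvLoopA_neg _ _ hk _ _ (Nat.le_refl _) _
  · rw [if_neg hk]
    dsimp only
    rw [pvExtendA_eq _ _ _ _ (by simp; omega) (by simp [pvIsClique]),
        pvCombos_eq_chooseL _ _ (by omega)]
    simp
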